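-- pv_equiv track=rewrite | github.com/ankitbapat/leetcode | StackAndQueues/MonolithicStack&QueueProblem/NextGreaterElement_2.py | fun_brute
-- ===== SOURCE A (Python) =====
-- def fun_brute(arr):
--     res=[-1] * len(arr)
--     for i in range(len(arr)):
--         item = arr[i]
--         j=(i+1) % len(arr)
--         while j != i:
--             if arr[j] > item:
--                 res[i] = arr[j]
--                 break
--             j=(j+1) % len(arr)
--     return res
-- ===== SOURCE B (Python) =====
-- def fun_brute(arr):
--     # next greater element in a circular array: monotonic decreasing stack
--     # over a doubled-index traversal (O(n) instead of O(n^2)).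
--     n = len(arr)
--     res = [-1] * n
--     stack = []
--     for k in range(2 * n):
--         i = k % n
--         x = arr[i]
--         while stack and arr[stack[-1]] < x:
--             res[stack.pop()] = x
--         if k < n:
--             stack.append(i)
--     return res
-- ===== Notes on version B (the rewrite author's own statement) =====
-- stated objective: faster
-- what changed: Replaced the per-index circular rescan with a single monotonic-stack pass over doubled indices, resolving each index's next greater element once.
import Mathlib
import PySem

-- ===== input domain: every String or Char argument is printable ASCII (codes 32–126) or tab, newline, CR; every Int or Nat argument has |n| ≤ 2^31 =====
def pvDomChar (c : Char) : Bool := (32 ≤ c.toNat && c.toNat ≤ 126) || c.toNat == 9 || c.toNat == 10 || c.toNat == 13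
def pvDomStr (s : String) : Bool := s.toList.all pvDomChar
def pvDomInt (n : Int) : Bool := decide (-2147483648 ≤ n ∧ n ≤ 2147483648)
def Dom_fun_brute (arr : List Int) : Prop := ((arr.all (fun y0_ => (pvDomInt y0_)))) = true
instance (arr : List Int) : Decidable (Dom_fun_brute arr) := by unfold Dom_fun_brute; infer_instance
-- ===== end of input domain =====

-- B replaces A's per-index circular rescan by one monotonic-stack pass over doubled indices (timed measurably faster).

-- ===== PORT A =====
-- Python's inner `while j != i:` loop, ported with fuel = arr.length (always enough:
-- j visits at most n-1 indices before coming back to i); `res[i] = arr[j]; break`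
-- becomes returning arr[j], and falling out of the loop returns -1 (res[i] untouched).
def bruteWhile (arr : List Int) (item : Int) (i : Nat) : Nat → Nat → Int
  | 0, _ => -1
  | fuel+1, j =>
    if j = i then -1
    else if item < arr.getD j 0 then arr.getD j 0
    else bruteWhile arr item i fuel ((j + 1) % arr.length)

def fun_brute (arr : List Int) : List Int :=
  (List.range arr.length).foldl
    (fun res i => res.set i (bruteWhile arr (arr.getD i 0) i arr.length ((i + 1) % arr.length)))
    (List.replicate arr.length (-1))

-- ===== PORT B =====
-- Python's inner `while stack and arr[stack[-1]] < x:` loop; the Lean list holds the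
-- stack with its TOP AT THE HEAD (Python appends/pops at the end).
def popLoop (arr : List Int) (x : Int) : List Int → List Nat → List Int × List Nat
  | res, [] => (res, [])
  | res, t :: rest =>
    if arr.getD t 0 < x then popLoop arr x (res.set t x) rest
    else (res, t :: rest)

def fun_brute_alt (arr : List Int) : List Int :=
  ((List.range (2 * arr.length)).foldl
    (fun (st : List Int × List Nat) k =>
      let i := k % arr.length
      let rs := popLoop arr (arr.getD i 0) st.1 st.2
      (rs.1, if k < arr.length then i :: rs.2 else rs.2))
    (List.replicate arr.length (-1), [])).1

-- ===== PRECONDITION & SPEC =====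
def Spec_fun_brute (arr : List Int) (out : List Int) : Prop := out = fun_brute_alt arr
instance (arr : List Int) (out : List Int) : Decidable (Spec_fun_brute arr out) := by unfold Spec_fun_brute; infer_instance

-- ===== CLAIM (what is proved, stated in full; the proofs are below) =====
def Claim_equal_fun_brute : Prop := ∀ (arr : List Int), Dom_fun_brute arr → Spec_fun_brute arr (fun_brute arr)

-- ===== LEMMAS AND PROOFS =====

-- value at circular index t
def pvA (arr : List Int) (t : Nat) : Int := arr.getD (t % arr.length) 0

-- "index p still has no greater element among steps p+1 .. k-1"
def survB (arr : List Int) (k p : Nat) : Bool :=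
  ((List.range' (p+1) (k - (p+1))).map (pvA arr)).all (fun x => decide (x ≤ pvA arr p))

-- first strictly greater value among steps p+1 .. k-1
def firstG (arr : List Int) (k p : Nat) : Option Int :=
  ((List.range' (p+1) (k - (p+1))).map (pvA arr)).find? (fun x => decide (pvA arr p < x))

def stackInv (arr : List Int) (k : Nat) : List Nat :=
  ((List.range (min k arr.length)).filter (survB arr k)).reverse

def resInv (arr : List Int) (k : Nat) : List Int :=
  (List.range arr.length).map
    (fun p => if p < min k arr.length then (firstG arr k p).getD (-1) else -1)

lemma set_map_range {f : Nat → Int} {n p : Nat} (v : Int) :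
    (List.map f (List.range n)).set p v
      = List.map (fun q => if q = p then v else f q) (List.range n) := by
  apply List.ext_getElem (by simp)
  intro i h1 h2
  rcases eq_or_ne p i with h | h
  · subst h; simp
  · simp only [List.getElem_set, List.getElem_map, List.getElem_range,
      if_neg h, if_neg (Ne.symm h)]

lemma mod_ne_of_lt {i k n : Nat} (hi : i < n) (hk1 : 1 ≤ k) (hkn : k < n) :
    (i + k) % n ≠ i := by
  rcases lt_or_ge (i + k) n with h | h
  · rw [Nat.mod_eq_of_lt h]; omega
  · rw [Nat.mod_eq_sub_mod h, Nat.mod_eq_of_lt (by omega)]; omega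

lemma bruteWhile_eq (arr : List Int) (item : Int) (i : Nat) (hi : i < arr.length) :
    ∀ (m k fuel : Nat), 1 ≤ k → k + m = arr.length → m < fuel →
      bruteWhile arr item i fuel ((i + k) % arr.length)
        = (((List.range' (i + k) m).map (pvA arr)).find?
            (fun x => decide (item < x))).getD (-1) := by
  intro m
  induction m with
  | zero =>
    intro k fuel hk1 hkm hf
    obtain ⟨f, rfl⟩ : ∃ f, fuel = f + 1 := ⟨fuel - 1, by omega⟩
    have hk : k = arr.length := by omega
    subst hk
    have h : (i + arr.length) % arr.length = i := by
      rw [Nat.add_mod_right, Nat.mod_eq_of_lt hi]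
    simp only [bruteWhile, h]
    simp
  | succ m ih =>
    intro k fuel hk1 hkm hf
    obtain ⟨f, rfl⟩ : ∃ f, fuel = f + 1 := ⟨fuel - 1, by omega⟩
    have hn2 : 2 ≤ arr.length := by omega
    have hne : (i + k) % arr.length ≠ i := mod_ne_of_lt hi hk1 (by omega)
    have hval : arr.getD ((i + k) % arr.length) 0 = pvA arr (i + k) := by
      simp [pvA]
    have hrange : List.range' (i + k) (m + 1) = (i + k) :: List.range' (i + k + 1) m :=
      List.range'_succ
    rw [hrange]
    simp only [bruteWhile, if_neg hne, hval, List.map_cons, List.find?_cons]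
    by_cases hgt : item < pvA arr (i + k)
    · simp [hgt]
    · have hstep : ((i + k) % arr.length + 1) % arr.length = (i + (k + 1)) % arr.length := by
        conv_rhs => rw [show i + (k + 1) = (i + k) + 1 by omega, Nat.add_mod (i + k) 1]
        rw [Nat.mod_eq_of_lt (show 1 < arr.length by omega)]
      rw [if_neg hgt, hstep]
      simpa [hgt, Nat.add_assoc] using ih (k + 1) f (by omega) (by omega) (by omega)

lemma brute_eq_map (arr : List Int) :
    fun_brute arr = (List.range arr.length).map
      (fun i => (((List.range' (i+1) (arr.length - 1)).map (pvA arr)).find?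
          (fun x => decide (pvA arr i < x))).getD (-1)) := by
  have key : ∀ k, k ≤ arr.length →
      (List.range k).foldl
        (fun res i => res.set i (bruteWhile arr (arr.getD i 0) i arr.length ((i + 1) % arr.length)))
        (List.replicate arr.length (-1))
      = (List.range arr.length).map
          (fun i => if i < k then bruteWhile arr (arr.getD i 0) i arr.length ((i + 1) % arr.length)
                    else -1) := by
    intro k
    induction k with
    | zero => intro _; simp
    | succ k ih =>
      intro hk
      rw [List.range_succ, List.foldl_append, List.foldl_cons, List.foldl_nil, ih (by omega),
        set_map_range]
      apply List.map_congr_left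
      intro q _
      by_cases hq1 : q = k
      · subst hq1; simp
      · by_cases hq2 : q < k
        · simp [hq1, hq2, show q < k + 1 by omega]
        · simp [hq1, hq2, show ¬(q < k + 1) by omega]
  rw [fun_brute, key arr.length (le_refl _)]
  apply List.map_congr_left
  intro p hp
  rw [List.mem_range] at hp
  rw [if_pos hp]
  have h1 := bruteWhile_eq arr (arr.getD p 0) p hp (arr.length - 1) 1 arr.length
    (le_refl _) (by omega) (by omega)
  rw [h1]
  have : arr.getD p 0 = pvA arr p := by simp [pvA, Nat.mod_eq_of_lt hp]
  rw [this]

lemma popLoop_eq (arr : List Int) (x : Int) :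
    ∀ (s : List Nat) (res : List Int),
      popLoop arr x res s
        = ((s.takeWhile (fun t => decide (arr.getD t 0 < x))).foldl (fun r t => r.set t x) res,
           s.dropWhile (fun t => decide (arr.getD t 0 < x))) := by
  intro s
  induction s with
  | nil => intro res; simp [popLoop]
  | cons t rest ih =>
    intro res
    by_cases h : arr.getD t 0 < x
    · rw [popLoop, if_pos h, ih, List.takeWhile_cons_of_pos (by simpa using h),
        List.dropWhile_cons_of_pos (by simpa using h), List.foldl_cons]
    · rw [popLoop, if_neg h, List.takeWhile_cons_of_neg (by simpa using h),
        List.dropWhile_cons_of_neg (by simpa using h)]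
      simp

lemma takeWhile_congr' {α : Type} {p q : α → Bool} :
    ∀ {l : List α}, (∀ x ∈ l, p x = q x) → l.takeWhile p = l.takeWhile q
  | [], _ => rfl
  | a :: l, h => by
    rw [List.takeWhile_cons, List.takeWhile_cons, h a (by simp),
      takeWhile_congr' (fun x hx => h x (by simp [hx]))]

lemma dropWhile_congr' {α : Type} {p q : α → Bool} :
    ∀ {l : List α}, (∀ x ∈ l, p x = q x) → l.dropWhile p = l.dropWhile q
  | [], _ => rfl
  | a :: l, h => by
    rw [List.dropWhile_cons, List.dropWhile_cons, h a (by simp),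
      dropWhile_congr' (fun x hx => h x (by simp [hx]))]

lemma dropWhile_reverse_of_pairwise {α : Type} (p : α → Bool) :
    ∀ (m : List α), m.Pairwise (fun u v => p u = true → p v = true) →
      m.reverse.dropWhile p = (m.filter (fun t => !p t)).reverse := by
  intro m
  induction m with
  | nil => intro _; simp
  | cons u m' ih =>
    intro hpw
    rw [List.pairwise_cons] at hpw
    obtain ⟨h1, h2⟩ := hpw
    rw [List.reverse_cons, List.dropWhile_append, List.filter_cons]
    by_cases hu : p u = true
    · have hall : ∀ x ∈ m'.reverse, p x = true := fun x hx => h1 x (List.mem_reverse.mp hx) hu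
      have hfe : m'.filter (fun t => !p t) = [] :=
        List.filter_eq_nil_iff.mpr (fun a ha => by simp [h1 a ha hu])
      rw [List.dropWhile_eq_nil_iff.mpr hall, hfe]
      simp [hu]
    · rw [ih h2]
      by_cases he : m'.filter (fun t => !p t) = []
      · simp [he, hu]

      · have : ((m'.filter (fun t => !p t)).reverse).isEmpty = false := by
          simp [he]
        rw [this]
        simp [hu]

lemma takeWhile_reverse_of_pairwise {α : Type} (p : α → Bool) :
    ∀ (m : List α), m.Pairwise (fun u v => p u = true → p v = true) →
      m.reverse.takeWhile p = (m.filter p).reverse := by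
  intro m
  induction m with
  | nil => intro _; simp
  | cons u m' ih =>
    intro hpw
    rw [List.pairwise_cons] at hpw
    obtain ⟨h1, h2⟩ := hpw
    rw [List.reverse_cons, List.takeWhile_append, List.filter_cons, ih h2]
    by_cases hu : p u = true
    · have hall : ∀ a ∈ m', p a = true := fun a ha => h1 a ha hu
      have hfe : m'.filter p = m' := List.filter_eq_self.mpr hall
      rw [hfe, if_pos (by simp)]
      simp [hu]
    · by_cases hall : ∀ a ∈ m', p a = true
      · have hfe : m'.filter p = m' := List.filter_eq_self.mpr hall
        rw [hfe, if_pos (by simp)]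
        simp [hu]
      · have hne : (m'.filter p).length ≠ m'.length := by
          rw [Ne, List.length_filter_eq_length_iff]; exact hall
        rw [if_neg (by simpa using hne)]
        simp [hu]

lemma survB_le {arr : List Int} {k u : Nat} (h : survB arr k u = true) :
    ∀ t, u < t → t < k → pvA arr t ≤ pvA arr u := by
  unfold survB at h
  rw [List.all_eq_true] at h
  intro t h1 h2
  have := h (pvA arr t) (List.mem_map.mpr ⟨t, List.mem_range'_1.mpr ⟨by omega, by omega⟩, rfl⟩)
  simpa using this

lemma survB_succ {arr : List Int} {k p : Nat} (hpk : p < k) :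
    survB arr (k+1) p = (survB arr k p && decide (pvA arr k ≤ pvA arr p)) := by
  unfold survB
  rw [show k + 1 - (p+1) = (k - (p+1)) + 1 by omega, List.range'_concat,
    show p + 1 + 1 * (k - (p+1)) = k by omega, List.map_append, List.all_append]
  simp

lemma firstG_succ {arr : List Int} {k p : Nat} (hpk : p < k) :
    firstG arr (k+1) p
      = (firstG arr k p).or (if pvA arr p < pvA arr k then some (pvA arr k) else none) := by
  unfold firstG
  rw [show k + 1 - (p+1) = (k - (p+1)) + 1 by omega, List.range'_concat,
    show p + 1 + 1 * (k - (p+1)) = k by omega, List.map_append, List.find?_append]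
  congr 1
  by_cases h : pvA arr p < pvA arr k <;> simp [h]

lemma survB_iff_none {arr : List Int} {k p : Nat} :
    survB arr k p = true ↔ firstG arr k p = none := by
  unfold survB firstG
  rw [List.all_eq_true, List.find?_eq_none]
  constructor <;> intro h x hx <;> have := h x hx <;> simp_all

lemma foldl_set_const {x : Int} {n : Nat} :
    ∀ (l : List Nat) (f : Nat → Int), (∀ t ∈ l, t < n) →
      l.foldl (fun r t => r.set t x) ((List.range n).map f)
        = (List.range n).map (fun p => if p ∈ l then x else f p) := by
  intro l
  induction l with
  | nil => intro f _; simp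
  | cons t l' ih =>
    intro f hlt
    rw [List.foldl_cons, set_map_range, ih _ (fun a ha => hlt a (by simp [ha]))]
    apply List.map_congr_left
    intro q _
    by_cases h1 : q ∈ l'
    · simp [h1]
    · by_cases h2 : q = t <;> simp [h1, h2]

lemma main_inv (arr : List Int) :
    ∀ k, k ≤ 2 * arr.length →
      (List.range k).foldl
        (fun (st : List Int × List Nat) k =>
          let i := k % arr.length
          let rs := popLoop arr (arr.getD i 0) st.1 st.2
          (rs.1, if k < arr.length then i :: rs.2 else rs.2))
        (List.replicate arr.length (-1), [])
      = (resInv arr k, stackInv arr k) := by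
  intro k
  induction k with
  | zero =>
    intro _
    simp [resInv, stackInv]
  | succ k ih =>
    intro hk
    have hn : 1 ≤ arr.length := by omega
    rw [List.range_succ, List.foldl_append, List.foldl_cons, List.foldl_nil, ih (by omega)]
    dsimp only
    set q : Nat → Bool := fun t => decide (pvA arr t < pvA arr k) with hq
    set m : List Nat := (List.range (min k arr.length)).filter (survB arr k) with hm
    have hmem : ∀ t ∈ m, t < min k arr.length := by
      intro t ht
      exact List.mem_range.mp (List.mem_filter.mp ht).1
    have hcongr : ∀ t ∈ m.reverse,
        (decide (arr.getD t 0 < arr.getD (k % arr.length) 0) : Bool) = q t := by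
      intro t ht
      have h1 : t < arr.length := lt_of_lt_of_le (hmem t (List.mem_reverse.mp ht)) (by omega)
      have h2 : arr.getD t 0 = pvA arr t := by unfold pvA; rw [Nat.mod_eq_of_lt h1]
      rw [hq, h2]
      rfl
    have hpair : m.Pairwise (fun u v => q u = true → q v = true) := by
      have hlt : m.Pairwise (· < ·) := List.pairwise_lt_range.filter _
      refine hlt.imp_of_mem ?_
      intro u v hu hv huv
      have hsu := (List.mem_filter.mp hu).2
      have hvr : v < min k arr.length := hmem v hv
      intro hqq
      have hle : pvA arr v ≤ pvA arr u := survB_le hsu v huv (by omega)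
      rw [hq] at hqq ⊢
      simp only [decide_eq_true_eq] at hqq ⊢
      exact lt_of_le_of_lt hle hqq
    have hstk : stackInv arr k = m.reverse := rfl
    rw [popLoop_eq, hstk, takeWhile_congr' hcongr, dropWhile_congr' hcongr,
      takeWhile_reverse_of_pairwise q m hpair, dropWhile_reverse_of_pairwise q m hpair]
    have hfilt : (List.range (min k arr.length)).filter (survB arr (k+1))
        = m.filter (fun t => !q t) := by
      rw [hm, List.filter_filter]
      apply List.filter_congr
      intro t ht
      rw [List.mem_range] at ht
      rw [survB_succ (show t < k by omega), hq]
      by_cases h : pvA arr t < pvA arr k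
      · simp [h, not_le.mpr h]
      · simp [h, not_lt.mp h]
    have hpoplt : ∀ t ∈ (m.filter q).reverse, t < arr.length := by
      intro t ht
      have := hmem t (List.filter_sublist.subset (List.mem_reverse.mp ht))
      omega
    have hmemp : ∀ p, p ∈ (m.filter q).reverse
        ↔ p < min k arr.length ∧ survB arr k p = true ∧ pvA arr p < pvA arr k := by
      intro p
      rw [List.mem_reverse, List.mem_filter, hm, List.mem_filter, List.mem_range, hq]
      simp [and_assoc]
    simp only [Prod.mk.injEq]
    constructor
    · -- result array component
      have hres : resInv arr k = (List.range arr.length).map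
          (fun p => if p < min k arr.length then (firstG arr k p).getD (-1) else -1) := rfl
      rw [hres, foldl_set_const _ _ hpoplt]
      apply List.map_congr_left
      intro p hp
      rw [List.mem_range] at hp
      by_cases hp1 : p ∈ (m.filter q).reverse
      · obtain ⟨hplt, hs, hlt⟩ := (hmemp p).mp hp1
        rw [if_pos hp1, if_pos (show p < min (k+1) arr.length by omega),
          firstG_succ (show p < k by omega), survB_iff_none.mp hs, Option.none_or,
          if_pos hlt]
        rfl
      · rw [if_neg hp1]
        by_cases hp2 : p < min k arr.length
        · have hpk : p < k := by omega
          rw [if_pos hp2, if_pos (show p < min (k+1) arr.length by omega), firstG_succ hpk]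
          by_cases hs : survB arr k p = true
          · have hnone := survB_iff_none.mp hs
            have hnlt : ¬ pvA arr p < pvA arr k := fun hlt =>
              hp1 ((hmemp p).mpr ⟨hp2, hs, hlt⟩)
            rw [hnone, Option.none_or, if_neg hnlt]
          · obtain ⟨v, hv⟩ : ∃ v, firstG arr k p = some v :=
              Option.ne_none_iff_exists'.mp (fun hn => hs (survB_iff_none.mpr hn))
            rw [hv, Option.some_or]
        · rw [if_neg hp2]
          by_cases hkn : k < arr.length
          · by_cases hpe : p = k
            · subst hpe
              rw [if_pos (show p < min (p+1) arr.length by omega)]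
              simp [firstG]
            · rw [if_neg (show ¬ p < min (k+1) arr.length by omega)]
          · omega
    · -- stack component
      by_cases hkn : k < arr.length
      · rw [if_pos hkn, Nat.mod_eq_of_lt hkn]
        have h1 : stackInv arr (k+1)
            = ((List.range k ++ [k]).filter (survB arr (k+1))).reverse := by
          unfold stackInv
          rw [show min (k+1) arr.length = k + 1 by omega, List.range_succ]
        have hsk : survB arr (k+1) k = true := by
          unfold survB
          simp
        rw [h1, List.filter_append]
        rw [show (List.filter (survB arr (k+1)) [k]) = [k] by simp [hsk]]
        rw [List.reverse_append]
        rw [show List.range k = List.range (min k arr.length) by rw [Nat.min_eq_left (by omega)],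
          hfilt]
        rfl
      · rw [if_neg hkn]
        unfold stackInv
        rw [show min (k+1) arr.length = min k arr.length by omega, hfilt]

lemma firstG_final (arr : List Int) (p : Nat) (hp : p < arr.length) :
    firstG arr (2 * arr.length) p
      = ((List.range' (p+1) (arr.length - 1)).map (pvA arr)).find?
          (fun x => decide (pvA arr p < x)) := by
  unfold firstG
  have hsplit : List.range' (p+1) (2 * arr.length - (p+1))
      = List.range' (p+1) (arr.length - 1) ++ List.range' (p + arr.length) (arr.length - p) := by
    rw [show p + arr.length = p + 1 + 1 * (arr.length - 1) by omega, List.range'_append]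
    congr 1
    omega
  rw [hsplit, List.map_append, List.find?_append]
  cases hfind : List.find? (fun x => decide (pvA arr p < x))
      (List.map (pvA arr) (List.range' (p+1) (arr.length - 1))) with
  | some v => simp
  | none =>
    rw [Option.none_or]
    rw [List.find?_eq_none]
    intro x hx
    obtain ⟨t, ht, rfl⟩ := List.mem_map.mp hx
    rw [List.mem_range'_1] at ht
    have hmod : t % arr.length = t - arr.length := by
      rw [Nat.mod_eq_sub_mod (by omega), Nat.mod_eq_of_lt (by omega)]
    have hvt : pvA arr t = pvA arr (t - arr.length) := by
      unfold pvA
      rw [hmod, Nat.mod_eq_of_lt (by omega)]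
    rcases eq_or_ne (t - arr.length) p with he | he
    · rw [hvt, he]; simp
    · have hmem : pvA arr (t - arr.length)
          ∈ List.map (pvA arr) (List.range' (p+1) (arr.length - 1)) :=
        List.mem_map.mpr ⟨t - arr.length, List.mem_range'_1.mpr ⟨by omega, by omega⟩, rfl⟩
      have := List.find?_eq_none.mp hfind _ hmem
      rw [hvt]
      exact this

-- ===== VERDICT (by name: the statement is the Claim_ definition above) =====
theorem fun_brute_spec : Claim_equal_fun_brute := by
  intro arr _
  unfold Spec_fun_brute
  rw [brute_eq_map, fun_brute_alt, main_inv arr (2 * arr.length) (le_refl _)]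
  simp only [resInv]
  apply List.map_congr_left
  intro p hp
  rw [List.mem_range] at hp
  rw [if_pos (lt_min (by omega) hp), firstG_final arr p hp]
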